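-- pv_equiv track=rewrite | github.com/BenjaminRogersSeng/AdventOfCode2024 | 4/crossword_checker_X-MAS.py | flatten_slices
-- ===== SOURCE A (Python) =====
-- def flatten_slices(matrix):
--     n = len(matrix)       # Number of rows
--     m = len(matrix[0])    # Number of columns
--
--     diagonals = []
--     anti_diagonals = []
--     result = []
--
--     # Main diagonals
--     for d in range(n + m - 1):
--         diagonal = []
--         for row in range(n):
--             col = d - row
--             if 0 <= col < m:
--                 diagonal.append(matrix[row][col])
--         if diagonal and len(diagonal) == 3:
--             result.append(diagonal)
--
--     # Anti-diagonals
--     for d in range(-(n - 1), m):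
--         anti_diagonal = []
--         for row in range(n):
--             col = row + d
--             if 0 <= col < m:
--                 anti_diagonal.append(matrix[row][col])
--         if anti_diagonal and len(anti_diagonal) == 3:
--             result.append(anti_diagonal)
--     return result
-- ===== SOURCE B (Python) =====
-- def flatten_slices(matrix):
--     n = len(matrix)
--     m = len(matrix[0])
--     result = []
--     # Main diagonals: cells (r, d - r); valid rows are max(0, d-m+1) .. min(n-1, d)
--     for d in range(n + m - 1):
--         lo = max(0, d - m + 1)
--         hi = min(n - 1, d)
--         if hi - lo == 2:
--             result.append([matrix[r][d - r] for r in range(lo, hi + 1)])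
--     # Anti-diagonals: cells (r, r + d); valid rows are max(0, -d) .. min(n-1, m-1-d)
--     for d in range(-(n - 1), m):
--         lo = max(0, -d)
--         hi = min(n - 1, m - 1 - d)
--         if hi - lo == 2:
--             result.append([matrix[r][r + d] for r in range(lo, hi + 1)])
--     return result
-- ===== Notes on version B (the rewrite author's own statement) =====
-- stated objective: faster
-- what changed: Instead of scanning all n rows for every diagonal offset, B computes for each offset the closed-form valid row interval and emits the three cells directly when the interval has length 3.
import Mathlib
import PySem

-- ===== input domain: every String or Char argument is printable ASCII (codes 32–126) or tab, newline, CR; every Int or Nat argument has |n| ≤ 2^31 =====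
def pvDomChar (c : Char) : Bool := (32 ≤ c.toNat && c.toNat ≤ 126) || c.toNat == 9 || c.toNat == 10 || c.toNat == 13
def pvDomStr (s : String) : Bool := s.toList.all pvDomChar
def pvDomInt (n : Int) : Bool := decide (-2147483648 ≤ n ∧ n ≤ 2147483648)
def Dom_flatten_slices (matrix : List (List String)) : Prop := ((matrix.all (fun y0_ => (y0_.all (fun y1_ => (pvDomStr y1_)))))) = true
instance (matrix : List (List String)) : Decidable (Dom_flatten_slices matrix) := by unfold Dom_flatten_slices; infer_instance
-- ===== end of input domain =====

-- B replaces A's inner scan over all rows by the closed-form valid row interval of each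
-- diagonal offset, emitting the three cells directly when that interval has length 3 (faster).

-- ===== PORT A =====
def flatten_slices (matrix : List (List String)) : List (List String) :=
  let n : Int := matrix.length
  let m : Int := (PySem.List.pyGetD matrix 0 []).length
  let result : List (List String) :=
    (PySem.List.pyRange 0 (n + m - 1) 1).foldl (fun result d =>
      let diagonal : List String :=
        (PySem.List.pyRange 0 n 1).foldl (fun diagonal row =>
          let col := d - row
          if 0 ≤ col ∧ col < m then
            diagonal ++ [PySem.List.pyGetD (PySem.List.pyGetD matrix row []) col ""]
          else diagonal) []
      if diagonal ≠ [] ∧ diagonal.length = 3 then result ++ [diagonal] else result) []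
  (PySem.List.pyRange (-(n - 1)) m 1).foldl (fun result d =>
    let anti_diagonal : List String :=
      (PySem.List.pyRange 0 n 1).foldl (fun anti_diagonal row =>
        let col := row + d
        if 0 ≤ col ∧ col < m then
          anti_diagonal ++ [PySem.List.pyGetD (PySem.List.pyGetD matrix row []) col ""]
        else anti_diagonal) []
    if anti_diagonal ≠ [] ∧ anti_diagonal.length = 3 then result ++ [anti_diagonal] else result)
    result

-- ===== PORT B =====
def flatten_slices_alt (matrix : List (List String)) : List (List String) :=
  let n : Int := matrix.length
  let m : Int := (PySem.List.pyGetD matrix 0 []).length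
  let result : List (List String) :=
    (PySem.List.pyRange 0 (n + m - 1) 1).foldl (fun result d =>
      let lo := max 0 (d - m + 1)
      let hi := min (n - 1) d
      if hi - lo = 2 then
        result ++ [(PySem.List.pyRange lo (hi + 1) 1).map (fun r =>
          PySem.List.pyGetD (PySem.List.pyGetD matrix r []) (d - r) "")]
      else result) []
  (PySem.List.pyRange (-(n - 1)) m 1).foldl (fun result d =>
    let lo := max 0 (-d)
    let hi := min (n - 1) (m - 1 - d)
    if hi - lo = 2 then
      result ++ [(PySem.List.pyRange lo (hi + 1) 1).map (fun r =>
        PySem.List.pyGetD (PySem.List.pyGetD matrix r []) (r + d) "")]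
    else result) result

-- ===== PRECONDITION & SPEC =====
-- Python A raises IndexError on an empty matrix (matrix[0]) and whenever some row is
-- shorter than the first row (matrix[row][col] with col < m); exactly those are excluded.
def Pre_flatten_slices (matrix : List (List String)) : Prop :=
  matrix ≠ [] ∧ ∀ r ∈ matrix, (matrix.headD []).length ≤ r.length
instance (matrix : List (List String)) : Decidable (Pre_flatten_slices matrix) := by
  unfold Pre_flatten_slices; infer_instance
def pvWitness_flatten_slices : List (List String) :=
  [["a", "b", "c"], ["d", "e", "f"], ["g", "h", "i"]]
def Spec_flatten_slices (matrix : List (List String)) (out : List (List String)) : Prop := out = flatten_slices_alt matrix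
instance (matrix : List (List String)) (out : List (List String)) : Decidable (Spec_flatten_slices matrix out) := by unfold Spec_flatten_slices; infer_instance

-- ===== CLAIM (what is proved, stated in full; the proofs are below) =====
def Claim_equal_flatten_slices : Prop := ∀ (matrix : List (List String)), Dom_flatten_slices matrix → Pre_flatten_slices matrix → Spec_flatten_slices matrix (flatten_slices matrix)

-- ===== LEMMAS AND PROOFS =====

-- A's inner scan over rows [a, b) keeping exactly the rows in [c, e) is the direct map
-- over the intersection interval.
theorem inner_scan_eq_map (g : Int → String) (c e : Int) :
    ∀ (k : Nat) (a b : Int), (b - a).toNat = k → ∀ (init : List String),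
      (PySem.List.pyRange a b 1).foldl
        (fun acc row => if c ≤ row ∧ row < e then acc ++ [g row] else acc) init
      = init ++ (PySem.List.pyRange (max a c) (min b e) 1).map g := by
  intro k
  induction k with
  | zero =>
    intro a b hk init
    rw [PySem.List.pyRange_one_eq_nil (by omega),
        PySem.List.pyRange_one_eq_nil (show min b e ≤ max a c by omega)]
    simp
  | succ k ih =>
    intro a b hk init
    rw [PySem.List.pyRange_one_cons (by omega)]
    simp only [List.foldl_cons]
    rw [ih (a + 1) b (by omega)]
    by_cases h : c ≤ a ∧ a < e
    · rw [if_pos h]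
      rw [show max a c = a by omega, show max (a + 1) c = a + 1 by omega,
          PySem.List.pyRange_one_cons (show a < min b e by omega)]
      simp
    · rw [if_neg h]
      rcases (not_and_or.mp h) with h' | h'
      · rw [show max (a + 1) c = max a c by omega]
      · rw [PySem.List.pyRange_one_eq_nil (show min b e ≤ max (a + 1) c by omega),
            PySem.List.pyRange_one_eq_nil (show min b e ≤ max a c by omega)]

-- A keeps a mapped interval iff it has exactly 3 cells, i.e. iff its bounds span 3.
theorem len3_cond (g : Int → String) (lo u : Int) (result : List (List String)) :
    (if ((PySem.List.pyRange lo u 1).map g) ≠ [] ∧ ((PySem.List.pyRange lo u 1).map g).length = 3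
     then result ++ [(PySem.List.pyRange lo u 1).map g] else result)
    = (if u - 1 - lo = 2 then result ++ [(PySem.List.pyRange lo u 1).map g] else result) := by
  refine if_congr ?_ rfl rfl
  rw [← List.length_pos_iff_ne_nil]
  simp [PySem.List.length_pyRange_one]
  omega

def gmain (matrix : List (List String)) (d : Int) : Int → String :=
  fun r => PySem.List.pyGetD (PySem.List.pyGetD matrix r []) (d - r) ""

def ganti (matrix : List (List String)) (d : Int) : Int → String :=
  fun r => PySem.List.pyGetD (PySem.List.pyGetD matrix r []) (r + d) ""

-- one step of A's main-diagonal loop equals one step of B's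
theorem main_step (matrix : List (List String)) (n m d : Int) (result : List (List String)) :
    (let diagonal : List String :=
        (PySem.List.pyRange 0 n 1).foldl (fun diagonal row =>
          let col := d - row
          if 0 ≤ col ∧ col < m then
            diagonal ++ [PySem.List.pyGetD (PySem.List.pyGetD matrix row []) col ""]
          else diagonal) []
     if diagonal ≠ [] ∧ diagonal.length = 3 then result ++ [diagonal] else result)
    = (let lo := max 0 (d - m + 1)
       let hi := min (n - 1) d
       if hi - lo = 2 then
         result ++ [(PySem.List.pyRange lo (hi + 1) 1).map (fun r =>
           PySem.List.pyGetD (PySem.List.pyGetD matrix r []) (d - r) "")]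
       else result) := by
  dsimp only
  have hf : (fun (diagonal : List String) (row : Int) =>
        if 0 ≤ d - row ∧ d - row < m then
          diagonal ++ [PySem.List.pyGetD (PySem.List.pyGetD matrix row []) (d - row) ""]
        else diagonal)
      = (fun acc row => if d - m + 1 ≤ row ∧ row < d + 1 then acc ++ [gmain matrix d row] else acc) := by
    funext acc row
    exact if_congr (by omega) rfl rfl
  rw [hf, inner_scan_eq_map (gmain matrix d) (d - m + 1) (d + 1) (n - 0).toNat 0 n rfl []]
  rw [List.nil_append, show min n (d + 1) = min (n - 1) d + 1 by omega, len3_cond]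
  exact if_congr (by omega) (by rfl) rfl

-- one step of A's anti-diagonal loop equals one step of B's
theorem anti_step (matrix : List (List String)) (n m d : Int) (result : List (List String)) :
    (let anti_diagonal : List String :=
        (PySem.List.pyRange 0 n 1).foldl (fun anti_diagonal row =>
          let col := row + d
          if 0 ≤ col ∧ col < m then
            anti_diagonal ++ [PySem.List.pyGetD (PySem.List.pyGetD matrix row []) col ""]
          else anti_diagonal) []
     if anti_diagonal ≠ [] ∧ anti_diagonal.length = 3 then result ++ [anti_diagonal] else result)
    = (let lo := max 0 (-d)
       let hi := min (n - 1) (m - 1 - d)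
       if hi - lo = 2 then
         result ++ [(PySem.List.pyRange lo (hi + 1) 1).map (fun r =>
           PySem.List.pyGetD (PySem.List.pyGetD matrix r []) (r + d) "")]
       else result) := by
  dsimp only
  have hf : (fun (anti_diagonal : List String) (row : Int) =>
        if 0 ≤ row + d ∧ row + d < m then
          anti_diagonal ++ [PySem.List.pyGetD (PySem.List.pyGetD matrix row []) (row + d) ""]
        else anti_diagonal)
      = (fun acc row => if -d ≤ row ∧ row < m - d then acc ++ [ganti matrix d row] else acc) := by
    funext acc row
    exact if_congr (by omega) rfl rfl
  rw [hf, inner_scan_eq_map (ganti matrix d) (-d) (m - d) (n - 0).toNat 0 n rfl []]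
  rw [List.nil_append, show min n (m - d) = min (n - 1) (m - 1 - d) + 1 by omega, len3_cond]
  exact if_congr (by omega) (by rfl) rfl

theorem ports_eq (matrix : List (List String)) :
    flatten_slices matrix = flatten_slices_alt matrix := by
  unfold flatten_slices flatten_slices_alt
  dsimp only
  congr 1
  · funext result d
    exact anti_step matrix _ _ d result
  · congr 1
    funext result d
    exact main_step matrix _ _ d result

-- ===== VERDICT (by name: the statement is the Claim_ definition above) =====
theorem flatten_slices_spec : Claim_equal_flatten_slices := by
  intro matrix _ _
  unfold Spec_flatten_slices
  exact ports_eq matrix
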